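-- pv_equiv track=rewrite | github.com/tai271828/c3-web-query | c3/api/gdoc.py | dimension_sync
-- ===== SOURCE A (Python) =====
-- def dimension_sync(data_sheet, data_c3):
--     data_sheet_new = []
--     for rn_i in range(len(data_c3)):
--         data_c3_row = data_c3[rn_i]
--         for rn_j in range(len(data_sheet)):
--             data_sheet_row = data_sheet[rn_j]
--             if data_c3_row[0] == data_sheet_row[0]:
--                 data_sheet_new.append(data_sheet_row)
--
--     return data_sheet_new
-- ===== SOURCE B (Python) =====
-- def dimension_sync(data_sheet, data_c3):
--     if not data_sheet or not data_c3:
--         return []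
--     index = {}
--     for row in data_sheet:
--         index.setdefault(row[0], []).append(row)
--     out = []
--     for row in data_c3:
--         out.extend(index.get(row[0], []))
--     return out
-- ===== Notes on version B (the rewrite author's own statement) =====
-- stated objective: alternative
-- what changed: Replaces the nested row-by-row scan with a one-pass hash index of sheet rows keyed by their first element, then a single lookup per c3 row; on duplicate-heavy keys the output itself is quadratic, so measured speed is comparable.
import Mathlib
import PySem

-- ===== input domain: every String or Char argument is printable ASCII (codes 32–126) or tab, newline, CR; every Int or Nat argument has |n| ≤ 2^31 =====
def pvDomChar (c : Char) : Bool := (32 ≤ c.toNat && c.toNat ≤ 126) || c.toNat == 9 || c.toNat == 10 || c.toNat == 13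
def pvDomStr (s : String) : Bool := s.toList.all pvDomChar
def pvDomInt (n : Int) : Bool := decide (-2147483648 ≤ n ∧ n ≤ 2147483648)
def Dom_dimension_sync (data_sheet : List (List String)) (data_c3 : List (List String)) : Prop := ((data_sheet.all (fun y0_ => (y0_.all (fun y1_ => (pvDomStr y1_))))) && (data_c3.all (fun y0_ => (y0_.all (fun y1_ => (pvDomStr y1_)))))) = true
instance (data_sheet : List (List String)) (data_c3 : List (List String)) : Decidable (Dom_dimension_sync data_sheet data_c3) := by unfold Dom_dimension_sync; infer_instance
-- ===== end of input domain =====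

-- B replaces A's nested row-by-row scan by a hash index of sheet rows keyed by their first
-- element, built once, with one lookup per c3 row (objective: alternative algorithm).

-- ===== PORT A =====
-- row[0] is ported as row.headI: Pre_ excludes the inputs where Python's row[0] would raise
-- IndexError, so the two agree wherever A returns.
def dimension_sync (data_sheet : List (List String)) (data_c3 : List (List String)) : List (List String) :=
  data_c3.foldl (fun data_sheet_new data_c3_row =>
    data_sheet.foldl (fun acc data_sheet_row =>
      if data_c3_row.headI = data_sheet_row.headI then acc ++ [data_sheet_row] else acc)
      data_sheet_new) []

-- ===== PORT B =====
-- index.setdefault(row[0], []).append(row)  =  modify row[0] [] (· ++ [row]); row[0] as headI (see above)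
def dimension_sync_alt (data_sheet : List (List String)) (data_c3 : List (List String)) : List (List String) :=
  if data_sheet = [] ∨ data_c3 = [] then []
  else
    let index : PySem.Dict String (List (List String)) :=
      data_sheet.foldl (fun d row => d.modify row.headI [] (· ++ [row])) PySem.Dict.empty
    data_c3.foldl (fun out row => out ++ index.getD row.headI []) []

-- ===== PRECONDITION & SPEC =====
-- Pre_ excludes exactly the inputs on which Python A raises IndexError (an empty row indexed
-- with [0], reachable only when both lists are nonempty); B raises there too.
def Pre_dimension_sync (data_sheet : List (List String)) (data_c3 : List (List String)) : Prop :=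
  data_sheet = [] ∨ data_c3 = [] ∨ ([] ∉ data_sheet ∧ [] ∉ data_c3)
instance (data_sheet : List (List String)) (data_c3 : List (List String)) : Decidable (Pre_dimension_sync data_sheet data_c3) := by unfold Pre_dimension_sync; infer_instance

def pvWitness_dimension_sync : List (List String) × List (List String) :=
  ([["a", "1"], ["b", "2"], ["a", "3"]], [["a"], ["c"]])

def Spec_dimension_sync (data_sheet : List (List String)) (data_c3 : List (List String)) (out : List (List String)) : Prop := out = dimension_sync_alt data_sheet data_c3
instance (data_sheet : List (List String)) (data_c3 : List (List String)) (out : List (List String)) : Decidable (Spec_dimension_sync data_sheet data_c3 out) := by unfold Spec_dimension_sync; infer_instance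

-- ===== CLAIM (what is proved, stated in full; the proofs are below) =====
def Claim_equal_dimension_sync : Prop := ∀ (data_sheet : List (List String)) (data_c3 : List (List String)), Dom_dimension_sync data_sheet data_c3 → Pre_dimension_sync data_sheet data_c3 → Spec_dimension_sync data_sheet data_c3 (dimension_sync data_sheet data_c3)

-- ===== LEMMAS AND PROOFS =====

-- The index lookup at key k yields exactly the sheet rows whose head is k, in order.
theorem getD_groupFold (l : List (List String)) (d : PySem.Dict String (List (List String))) (k : String) :
    (l.foldl (fun d row => d.modify row.headI [] (· ++ [row])) d).getD k []
      = d.getD k [] ++ l.filter (fun row => row.headI = k) := by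
  induction l generalizing d with
  | nil => simp
  | cons r t ih =>
    simp only [List.foldl_cons, ih, List.filter_cons]
    rw [PySem.Dict.getD_modify]
    by_cases h : k = r.headI
    · simp [h]
    · simp [h, Ne.symm h]

-- A's inner loop appends exactly the matching sheet rows.
theorem inner_loop_eq (ds : List (List String)) (c : List String) (acc : List (List String)) :
    ds.foldl (fun acc s => if c.headI = s.headI then acc ++ [s] else acc) acc
      = acc ++ ds.filter (fun s => s.headI = c.headI) := by
  induction ds generalizing acc with
  | nil => simp
  | cons r t ih =>
    simp only [List.foldl_cons, List.filter_cons, ih]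
    by_cases h : c.headI = r.headI
    · simp [h]
    · simp [h, Ne.symm h]

-- Both programs equal the same flat filter-per-row form, unconditionally on the ports.
theorem ports_eq (ds dc : List (List String)) :
    dimension_sync ds dc = dimension_sync_alt ds dc := by
  unfold dimension_sync dimension_sync_alt
  by_cases hds : ds = [] ∨ dc = []
  · rcases hds with h | h <;> subst h <;> simp [inner_loop_eq]
  · simp only [if_neg hds, inner_loop_eq, getD_groupFold, PySem.Dict.getD_empty,
      List.nil_append]

-- ===== VERDICT (by name: the statement is the Claim_ definition above) =====
theorem dimension_sync_spec : Claim_equal_dimension_sync := by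
  intro ds dc _ _
  exact ports_eq ds dc
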